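-- pv_equiv track=rewrite | github.com/ofrancome/aoc | day03/day3-2.py | most_values_in_column
-- ===== SOURCE A (Python) =====
-- def most_values_in_column(input_array, column):
--     count = 0
--     for line in input_array:
--         if line[column] == "1":
--             count += 1
--         elif line[column] == "0":
--             count -= 1
--     if count > 0:
--         return "1"
--     elif count < 0:
--         return "0"
--     else:
--         return "draw"
-- ===== SOURCE B (Python) =====
-- def most_values_in_column(input_array, column):
--     col = [line[column] for line in input_array]
--     ones = col.count("1")
--     zeros = col.count("0")
--     if ones > zeros:
--         return "1"
--     if zeros > ones:
--         return "0"
--     return "draw"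
-- ===== Notes on version B (the rewrite author's own statement) =====
-- stated objective: idiomatic
-- what changed: B extracts the column once into a list and compares the counts of "1" and "0" (build-then-count), instead of A's signed running difference with explicit per-element branching.
import Mathlib
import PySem

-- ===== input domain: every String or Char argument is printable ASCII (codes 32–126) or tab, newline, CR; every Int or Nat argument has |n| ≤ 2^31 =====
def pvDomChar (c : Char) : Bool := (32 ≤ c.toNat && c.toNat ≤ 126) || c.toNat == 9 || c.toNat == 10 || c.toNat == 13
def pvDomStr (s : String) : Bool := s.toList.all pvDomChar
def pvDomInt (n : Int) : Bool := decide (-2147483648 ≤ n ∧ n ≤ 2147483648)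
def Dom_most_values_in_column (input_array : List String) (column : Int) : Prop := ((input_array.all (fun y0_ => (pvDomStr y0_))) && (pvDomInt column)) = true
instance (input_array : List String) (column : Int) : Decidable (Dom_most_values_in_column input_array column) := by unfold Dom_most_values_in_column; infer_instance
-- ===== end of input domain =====

-- B builds the column as a list and compares counts of '1' and '0', replacing A's signed running difference (idiomatic; return-value equivalence).


-- ===== PORT A =====
def most_values_in_column (input_array : List String) (column : Int) : String :=
  let count : Int := input_array.foldl (fun count line =>
    if PySem.Str.pyGet? line column == some '1' then count + 1
    else if PySem.Str.pyGet? line column == some '0' then count - 1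
    else count) 0
  if count > 0 then "1"
  else if count < 0 then "0"
  else "draw"

-- ===== PORT B =====
def most_values_in_column_alt (input_array : List String) (column : Int) : String :=
  let col : List (Option Char) := input_array.map (fun line => PySem.Str.pyGet? line column)
  let ones : Nat := col.count (some '1')
  let zeros : Nat := col.count (some '0')
  if ones > zeros then "1"
  else if zeros > ones then "0"
  else "draw"

-- ===== PRECONDITION & SPEC =====
-- Pre_: exactly the inputs where Python A returns: every line admits index `column` (else line[column] raises IndexError).
def Pre_most_values_in_column (input_array : List String) (column : Int) : Prop :=
  ∀ line ∈ input_array, PySem.Raise.InRange line.toList.length column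
instance (input_array : List String) (column : Int) : Decidable (Pre_most_values_in_column input_array column) := by unfold Pre_most_values_in_column; infer_instance
def pvWitness_most_values_in_column : List String × Int := (["10", "01", "11"], 0)
def Spec_most_values_in_column (input_array : List String) (column : Int) (out : String) : Prop := out = most_values_in_column_alt input_array column
instance (input_array : List String) (column : Int) (out : String) : Decidable (Spec_most_values_in_column input_array column out) := by unfold Spec_most_values_in_column; infer_instance

-- ===== CLAIM (what is proved, stated in full; the proofs are below) =====
def Claim_equal_most_values_in_column : Prop := ∀ (input_array : List String) (column : Int), Dom_most_values_in_column input_array column → Pre_most_values_in_column input_array column → Spec_most_values_in_column input_array column (most_values_in_column input_array column)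

-- ===== LEMMAS AND PROOFS =====

-- A's running difference equals (count of some '1') − (count of some '0') over the extracted column.
theorem count_diff (column : Int) (l : List String) (acc : Int) :
    l.foldl (fun count line =>
      if PySem.Str.pyGet? line column == some '1' then count + 1
      else if PySem.Str.pyGet? line column == some '0' then count - 1
      else count) acc
    = acc + ((l.map (fun line => PySem.Str.pyGet? line column)).count (some '1') : Int)
          - ((l.map (fun line => PySem.Str.pyGet? line column)).count (some '0') : Int) := by
  induction l generalizing acc with
  | nil => simp
  | cons x xs ih =>
    simp only [List.foldl_cons, List.map_cons, List.count_cons, beq_iff_eq] at ih ⊢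
    rw [ih]
    split_ifs <;> simp_all <;> omega

-- ===== VERDICT (by name: the statement is the Claim_ definition above) =====
theorem most_values_in_column_spec : Claim_equal_most_values_in_column := by
  intro input_array column _ _
  unfold Spec_most_values_in_column most_values_in_column most_values_in_column_alt
  rw [count_diff]
  set o := (input_array.map (fun line => PySem.Str.pyGet? line column)).count (some '1') with ho
  set z := (input_array.map (fun line => PySem.Str.pyGet? line column)).count (some '0') with hz
  by_cases h1 : o > z
  · rw [if_pos (by omega), if_pos (by omega)]
  · by_cases h2 : z > o
    · rw [if_neg (by omega), if_pos (by omega), if_neg (by omega), if_pos (by omega)]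
    · rw [if_neg (by omega), if_neg (by omega), if_neg (by omega), if_neg (by omega)]
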